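-- pv_equiv track=rewrite | github.com/oodeng98/Algorithm | Class 3/2630 색종이 만들기/26527116 20210219 맞았습니다!! 29028KB 88ms.py | find_square1
-- ===== SOURCE A (Python) =====
-- def find_square1(data):
--     if len(data[0]) == 1:
--         if data[0][0] == 1:
--             return 1
--         return 0
--     check = 0
--     for i in data:
--         for j in i:
--             if j == 0:
--                 check = 1
--                 break
--         if check == 1:
--             break
--     if check == 0:
--         return 1
--     data1 = []
--     data2 = []
--     data3 = []
--     data4 = []
--     new_square = len(data) // 2
--     for i in range(new_square):
--         data1.append(data[i][:new_square])
--         data2.append(data[i][new_square:])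
--         data3.append(data[new_square + i][:new_square])
--         data4.append(data[new_square + i][new_square:])
--     return find_square1(data1) + find_square1(data2) + find_square1(data3) + find_square1(data4)
-- ===== SOURCE B (Python) =====
-- def find_square1(data):
--     # A one-cell-wide first row decides the answer by itself, and a sheet with
--     # no white cell is a single blue square; otherwise record the positions of
--     # white (0) cells once, per row, and recurse on index ranges, deciding a
--     # region's uniformity by testing whether any recorded white position falls
--     # inside it (no quadrant copies).
--     if len(data[0]) == 1:
--         return 1 if data[0][0] == 1 else 0
--     zpos = [[j for j, x in enumerate(row) if x == 0] for row in data]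
--     if all(not z for z in zpos):
--         return 1
--
--     def blank(r, c, s):
--         return all(not any(c <= j < c + s for j in zpos[i]) for i in range(r, r + s))
--
--     def go(r, c, s):
--         if s == 1:
--             return 1 if data[r][c] == 1 else 0
--         if blank(r, c, s):
--             return 1
--         h = s // 2
--         return (go(r, c, h) + go(r, c + h, h)
--                 + go(r + h, c, h) + go(r + h, c + h, h))
--
--     return go(0, 0, len(data))
-- ===== Notes on version B (the rewrite author's own statement) =====
-- stated objective: alternative
-- what changed: B keeps A's two whole-sheet early returns (single-cell first row; no white cell) but replaces A's rescan-and-copy quadrant recursion by index-range recursion over white-cell positions recorded once per row, deciding a region's uniformity by testing whether a recorded white position falls inside it instead of rescanning and materializing four quadrant copies at every level.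
-- outside the precondition, e.g. on find_square1([[2, 0], [1]]): A returns 2, B raises IndexError; on find_square1([[], [], [9, -1, -3], [0, 10, 7]]): A returns 2, B returns 3
import Mathlib
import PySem

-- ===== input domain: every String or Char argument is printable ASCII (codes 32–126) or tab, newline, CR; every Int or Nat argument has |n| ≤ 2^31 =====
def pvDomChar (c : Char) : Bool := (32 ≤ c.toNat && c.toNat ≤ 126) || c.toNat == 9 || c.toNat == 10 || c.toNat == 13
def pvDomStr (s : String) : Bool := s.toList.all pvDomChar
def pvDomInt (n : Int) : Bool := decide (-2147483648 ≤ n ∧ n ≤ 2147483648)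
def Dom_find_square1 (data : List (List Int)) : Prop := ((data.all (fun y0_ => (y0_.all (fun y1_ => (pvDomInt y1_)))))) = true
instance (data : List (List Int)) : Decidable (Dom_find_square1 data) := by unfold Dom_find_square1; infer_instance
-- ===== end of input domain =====

-- B keeps A's two whole-sheet early returns (one-cell-wide first row; no
-- white cell at all) and replaces A's rescan-and-copy quadrant recursion by
-- index recursion over white-cell positions recorded once per row.

-- ===== PORT A =====
-- Python loops building data1..data4 from range(new_square) are ported as four
-- maps over List.range (same elements, same order); data[i] with 0 ≤ i < len
-- is List.getD; slices [:h] / [h:] with natural bounds are take/drop.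
def find_square1 (data : List (List Int)) : Int :=
  if hnil : data = [] then 0  -- Python raises IndexError at data[0]; outside Pre_
  else if (data.getD 0 []).length = 1 then
    (if (data.getD 0 []).getD 0 0 = 1 then 1 else 0)
  else if (data.any fun row => row.any fun j => decide (j = 0)) = false then 1
  else
    let h := data.length / 2
    find_square1 ((List.range h).map fun i => (data.getD i []).take h) +
    find_square1 ((List.range h).map fun i => (data.getD i []).drop h) +
    find_square1 ((List.range h).map fun i => (data.getD (h + i) []).take h) +
    find_square1 ((List.range h).map fun i => (data.getD (h + i) []).drop h)
termination_by data.length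
decreasing_by
  all_goals
    simp only [List.length_map, List.length_range]
    cases data with
    | nil => exact absurd rfl hnil
    | cons a l => simp; omega

-- ===== PORT B =====
-- [j for j, x in enumerate(row) if x == 0] (zipIdx pairs are (x, j))
def zposB (row : List Int) : List Nat :=
  ((row.zipIdx).filter fun p => decide (p.1 = 0)).map fun p => p.2

-- all(not any(c <= j < c + s for j in zpos[i]) for i in range(r, r + s))
def blankB (zpos : List (List Nat)) (r c s : Nat) : Bool :=
  (List.range' r s).all fun i =>
    !((zpos.getD i []).any fun j => decide (c ≤ j ∧ j < c + s))

def goB (data : List (List Int)) (zpos : List (List Nat)) (r c s : Nat) : Int :=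
  if s = 1 then (if (data.getD r []).getD c 0 = 1 then 1 else 0)
  else if hbl : blankB zpos r c s then 1
  else
    let h := s / 2
    goB data zpos r c h + goB data zpos r (c + h) h +
    goB data zpos (r + h) c h + goB data zpos (r + h) (c + h) h
termination_by s
decreasing_by
  all_goals
    have hs0 : s ≠ 0 := by rintro rfl; simp [blankB] at hbl
    omega

def find_square1_alt (data : List (List Int)) : Int :=
  if (data.getD 0 []).length = 1 then
    (if (data.getD 0 []).getD 0 0 = 1 then 1 else 0)
  else if (data.map zposB).all (fun z => z.isEmpty) then 1
  else goB data (data.map zposB) 0 0 data.length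

-- ===== PRECONDITION & SPEC =====
-- Pre_ admits the inputs on which both programs return the same value: any
-- sheet whose first row is a single cell (A answers from that cell alone),
-- any sheet with no white (0) cell at all (both answer 1), and square grids
-- of power-of-two side (BOJ 2630's input shape).  Excluded shapes are ones
-- where A raises (odd-side subdivision ends by recursing on []) or where its
-- value on a ragged zero-containing sheet is an accident of its lossy
-- slicing, which B's index recursion does not reproduce (see cites).
def Pre_find_square1 (data : List (List Int)) : Prop :=
  data ≠ [] ∧
    ((data.getD 0 []).length = 1 ∨
     (∀ row ∈ data, ∀ x ∈ row, ¬x = 0) ∨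
     (data.length.isPowerOfTwo ∧ ∀ row ∈ data, row.length = data.length))
instance (data : List (List Int)) : Decidable (Pre_find_square1 data) := by
  unfold Pre_find_square1; infer_instance

def pvWitness_find_square1 : List (List Int) := [[1, 0], [0, 1]]

def Spec_find_square1 (data : List (List Int)) (out : Int) : Prop := out = find_square1_alt data
instance (data : List (List Int)) (out : Int) : Decidable (Spec_find_square1 data out) := by unfold Spec_find_square1; infer_instance

-- ===== CLAIM (what is proved, stated in full; the proofs are below) =====
def Claim_equal_find_square1 : Prop := ∀ (data : List (List Int)), Dom_find_square1 data → Pre_find_square1 data → Spec_find_square1 data (find_square1 data)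

-- ===== LEMMAS AND PROOFS =====

-- the s×s subgrid of data with top-left corner (r, c)
def subG (data : List (List Int)) (r c s : Nat) : List (List Int) :=
  ((data.drop r).take s).map fun row => (row.drop c).take s

theorem mem_zposB (row : List Int) (j : Nat) :
    j ∈ zposB row ↔ row[j]? = some 0 := by
  unfold zposB
  simp only [List.mem_map, List.mem_filter, decide_eq_true_eq]
  constructor
  · rintro ⟨⟨x, i⟩, ⟨hmem, hx0⟩, rfl⟩
    rw [List.mk_mem_zipIdx_iff_getElem?] at hmem
    rw [← hx0]
    exact hmem
  · intro hj
    exact ⟨(0, j), ⟨List.mk_mem_zipIdx_iff_getElem?.2 hj, rfl⟩, rfl⟩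

theorem blank_row (row : List Int) (c s : Nat) :
    ((zposB row).any fun j => decide (c ≤ j ∧ j < c + s)) = false ↔
      (((row.drop c).take s).any fun x => decide (x = 0)) = false := by
  rw [List.any_eq_false, List.any_eq_false]
  constructor
  · intro hL x hxmem
    simp only [decide_eq_true_eq]
    intro hx0
    obtain ⟨i, hi, hgx⟩ := List.getElem_of_mem hxmem
    have hlen : i < s ∧ c + i < row.length := by
      simp only [List.length_take, List.length_drop] at hi; omega
    have hval : row[c + i]'hlen.2 = x := by
      rw [← hgx]; simp
    have hjmem : (c + i) ∈ zposB row := by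
      rw [mem_zposB, List.getElem?_eq_getElem hlen.2, hval, hx0]
    have := hL _ hjmem
    simp only [decide_eq_true_eq] at this
    exact this ⟨by omega, by omega⟩
  · intro hR j hjmem
    simp only [decide_eq_true_eq]
    rintro ⟨hc, hcs⟩
    rw [mem_zposB] at hjmem
    obtain ⟨hjlt, hj0⟩ := List.getElem?_eq_some_iff.1 hjmem
    have hmem : (0 : Int) ∈ (row.drop c).take s := by
      have h1 : j - c < ((row.drop c).take s).length := by
        simp only [List.length_take, List.length_drop]; omega
      have h2 : ((row.drop c).take s)[j - c]'h1 = (0 : Int) := by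
        simp only [List.getElem_take, List.getElem_drop]
        simp only [show c + (j - c) = j from by omega]
        exact hj0
      rw [← h2]
      exact List.getElem_mem _
    have := hR _ hmem
    simp at this

theorem length_subG (data : List (List Int)) (r c s : Nat) (h : r + s ≤ data.length) :
    (subG data r c s).length = s := by
  simp [subG]; omega

theorem getElem_subG (data : List (List Int)) (r c s i : Nat) (h : r + s ≤ data.length)
    (hi : i < s) :
    (subG data r c s)[i]'(by rw [length_subG data r c s h]; exact hi) =
      ((data[r + i]'(by omega)).drop c).take s := by
  simp [subG]

theorem getD_map_zposB (data : List (List Int)) (i : Nat) (hi : i < data.length) :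
    (data.map zposB).getD i [] = zposB (data[i]'hi) := by
  rw [List.getD_eq_getElem _ _ (by simpa using hi)]
  simp

theorem blankB_iff (data : List (List Int)) (r c s : Nat)
    (hr : r + s ≤ data.length) :
    blankB (data.map zposB) r c s = true ↔
      ((subG data r c s).any fun row => row.any fun j => decide (j = 0)) = false := by
  unfold blankB
  rw [List.all_eq_true, List.any_eq_false]
  constructor
  · intro hbl row hrow
    obtain ⟨i, hlt, heq⟩ := List.getElem_of_mem hrow
    rw [length_subG data r c s hr] at hlt
    rw [← heq, getElem_subG data r c s i hr hlt, Bool.not_eq_true]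
    apply (blank_row (data[r + i]'(by omega)) c s).1
    have := hbl (r + i) (by rw [List.mem_range'_1]; omega)
    rw [getD_map_zposB data (r + i) (by omega)] at this
    simpa using this
  · intro hany i hi
    rw [List.mem_range'_1] at hi
    rw [getD_map_zposB data i (by omega)]
    rw [Bool.not_eq_eq_eq_not, Bool.not_true]
    apply (blank_row (data[i]'(by omega)) c s).2
    rw [← Bool.not_eq_true]
    apply hany
    have h2 := getElem_subG data r c s (i - r) hr (by omega)
    have h3 : r + (i - r) = i := by omega
    simp only [h3] at h2
    rw [← h2]
    exact List.getElem_mem _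

theorem main_lemma (data : List (List Int))
    (hsq : ∀ row ∈ data, row.length = data.length) :
    ∀ (k r c : Nat), r + 2 ^ k ≤ data.length → c + 2 ^ k ≤ data.length →
      find_square1 (subG data r c (2 ^ k)) = goB data (data.map zposB) r c (2 ^ k) := by
  intro k
  induction k with
  | zero =>
    intro r c hr hc
    rw [pow_zero] at hr hc ⊢
    have hrlt : r < data.length := by omega
    have hrowlen : (data[r]'hrlt).length = data.length := hsq _ (List.getElem_mem _)
    have hclt : c < (data[r]'hrlt).length := by omega
    have hsub : subG data r c 1 = [[(data[r]'hrlt)[c]'hclt]] := by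
      unfold subG
      rw [List.drop_eq_getElem_cons hrlt, List.take_succ_cons, List.take_zero]
      simp only [List.map_cons, List.map_nil]
      rw [List.drop_eq_getElem_cons hclt, List.take_succ_cons, List.take_zero]
    rw [hsub, find_square1, goB]
    rw [dif_neg (by simp : ¬([[(data[r]'hrlt)[c]'hclt]] = ([] : List (List Int))))]
    have e1 : (([[(data[r]'hrlt)[c]'hclt]] : List (List Int)).getD 0 [])
        = [(data[r]'hrlt)[c]'hclt] := rfl
    rw [e1, if_pos (by simp : ([(data[r]'hrlt)[c]'hclt] : List Int).length = 1)]
    have e2 : (([(data[r]'hrlt)[c]'hclt] : List Int).getD 0 0) = (data[r]'hrlt)[c]'hclt := rfl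
    have hv : (data.getD r []).getD c 0 = (data[r]'hrlt)[c]'hclt := by
      rw [List.getD_eq_getElem _ _ hrlt, List.getD_eq_getElem _ _ hclt]
    rw [e2, if_pos rfl, hv]
  | succ k ih =>
    intro r c hr hc
    have hpow : 2 ^ (k + 1) = 2 ^ k + 2 ^ k := by rw [pow_succ]; omega
    have hk1 : 1 ≤ 2 ^ k := Nat.one_le_two_pow
    have hrlt : r < data.length := by omega
    have hrowlen : (data[r]'hrlt).length = data.length := hsq _ (List.getElem_mem _)
    have glen : (subG data r c (2 ^ (k + 1))).length = 2 ^ (k + 1) :=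
      length_subG data r c _ hr
    have hnil : subG data r c (2 ^ (k + 1)) ≠ [] := by
      intro hE; rw [hE] at glen; simp at glen; omega
    have hget0 : (subG data r c (2 ^ (k + 1))).getD 0 []
        = ((data[r]'hrlt).drop c).take (2 ^ (k + 1)) := by
      rw [List.getD_eq_getElem _ _ (by rw [glen]; omega)]
      have h0 := getElem_subG data r c (2 ^ (k + 1)) 0 hr (by omega)
      simpa using h0
    have hne1 : ¬((subG data r c (2 ^ (k + 1))).getD 0 []).length = 1 := by
      rw [hget0]
      simp only [List.length_take, List.length_drop, hrowlen]
      omega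
    have hq1 : (List.range (2 ^ k)).map
        (fun i => ((subG data r c (2 ^ (k + 1))).getD i []).take (2 ^ k))
        = subG data r c (2 ^ k) := by
      apply List.ext_getElem
      · simp [length_subG data r c (2 ^ k) (by omega)]
      intro i h1 h2
      simp only [List.getElem_map, List.getElem_range]
      have hi : i < 2 ^ k := by simpa using h1
      rw [List.getD_eq_getElem _ _ (by rw [glen]; omega)]
      rw [getElem_subG data r c (2 ^ (k + 1)) i hr (by omega)]
      rw [getElem_subG data r c (2 ^ k) i (by omega) hi]
      rw [List.take_take]
      congr 1
      omega
    have hq2 : (List.range (2 ^ k)).map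
        (fun i => ((subG data r c (2 ^ (k + 1))).getD i []).drop (2 ^ k))
        = subG data r (c + 2 ^ k) (2 ^ k) := by
      apply List.ext_getElem
      · simp [length_subG data r (c + 2 ^ k) (2 ^ k) (by omega)]
      intro i h1 h2
      simp only [List.getElem_map, List.getElem_range]
      have hi : i < 2 ^ k := by simpa using h1
      rw [List.getD_eq_getElem _ _ (by rw [glen]; omega)]
      rw [getElem_subG data r c (2 ^ (k + 1)) i hr (by omega)]
      rw [getElem_subG data r (c + 2 ^ k) (2 ^ k) i (by omega) hi]
      rw [List.drop_take, List.drop_drop]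
      congr 1
      omega
    have hq3 : (List.range (2 ^ k)).map
        (fun i => ((subG data r c (2 ^ (k + 1))).getD (2 ^ k + i) []).take (2 ^ k))
        = subG data (r + 2 ^ k) c (2 ^ k) := by
      apply List.ext_getElem
      · simp [length_subG data (r + 2 ^ k) c (2 ^ k) (by omega)]
      intro i h1 h2
      simp only [List.getElem_map, List.getElem_range]
      have hi : i < 2 ^ k := by simpa using h1
      rw [List.getD_eq_getElem _ _ (by rw [glen]; omega)]
      rw [getElem_subG data r c (2 ^ (k + 1)) (2 ^ k + i) hr (by omega)]
      rw [getElem_subG data (r + 2 ^ k) c (2 ^ k) i (by omega) hi]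
      rw [List.take_take]
      simp only [Nat.add_assoc]
      congr 1
      omega
    have hq4 : (List.range (2 ^ k)).map
        (fun i => ((subG data r c (2 ^ (k + 1))).getD (2 ^ k + i) []).drop (2 ^ k))
        = subG data (r + 2 ^ k) (c + 2 ^ k) (2 ^ k) := by
      apply List.ext_getElem
      · simp [length_subG data (r + 2 ^ k) (c + 2 ^ k) (2 ^ k) (by omega)]
      intro i h1 h2
      simp only [List.getElem_map, List.getElem_range]
      have hi : i < 2 ^ k := by simpa using h1
      rw [List.getD_eq_getElem _ _ (by rw [glen]; omega)]
      rw [getElem_subG data r c (2 ^ (k + 1)) (2 ^ k + i) hr (by omega)]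
      rw [getElem_subG data (r + 2 ^ k) (c + 2 ^ k) (2 ^ k) i (by omega) hi]
      rw [List.drop_take, List.drop_drop]
      simp only [Nat.add_assoc]
      congr 1
      omega
    have hbl := blankB_iff data r c (2 ^ (k + 1)) hr
    rw [find_square1, goB]
    rw [dif_neg hnil, if_neg hne1, if_neg (by omega : ¬(2 ^ (k + 1) = 1))]
    by_cases hA :
        ((subG data r c (2 ^ (k + 1))).any fun row => row.any fun j => decide (j = 0)) = false
    · rw [if_pos hA, dif_pos (hbl.2 hA)]
    · rw [if_neg hA, dif_neg (fun hx => hA (hbl.1 hx))]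
      simp only [glen]
      rw [show 2 ^ (k + 1) / 2 = 2 ^ k from by omega]
      rw [hq1, hq2, hq3, hq4]
      rw [ih r c (by omega) (by omega), ih r (c + 2 ^ k) (by omega) (by omega),
        ih (r + 2 ^ k) c (by omega) (by omega), ih (r + 2 ^ k) (c + 2 ^ k) (by omega) (by omega)]

theorem subG_self (data : List (List Int))
    (hsq : ∀ row ∈ data, row.length = data.length) :
    subG data 0 0 data.length = data := by
  unfold subG
  rw [List.drop_zero, List.take_of_length_le (le_refl _)]
  conv_rhs => rw [← List.map_id data]
  apply List.map_congr_left
  intro row hrow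
  rw [List.drop_zero, List.take_of_length_le (by rw [hsq row hrow]), id]

-- zero-free rows record no white position
theorem zposB_nil (row : List Int) (h : ∀ x ∈ row, ¬x = 0) : zposB row = [] := by
  unfold zposB
  rw [List.map_eq_nil_iff, List.filter_eq_nil_iff]
  rintro ⟨x, i⟩ hmem
  rw [List.mk_mem_zipIdx_iff_getElem?] at hmem
  obtain ⟨hlt, hx⟩ := List.getElem?_eq_some_iff.1 hmem
  simpa [hx] using h _ (by rw [← hx]; exact List.getElem_mem _)


-- A's whole-sheet scan finds no white cell on a zero-free sheet
theorem anyzero_false (data : List (List Int))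
    (hz : ∀ row ∈ data, ∀ x ∈ row, ¬x = 0) :
    (data.any fun row => row.any fun j => decide (j = 0)) = false := by
  rw [List.any_eq_false]
  intro row hrow
  rw [Bool.not_eq_true, List.any_eq_false]
  intro x hx
  simpa using hz row hrow x hx

-- ===== VERDICT (by name: the statement is the Claim_ definition above) =====
theorem find_square1_spec : Claim_equal_find_square1 := by
  intro data _ hpre
  unfold Spec_find_square1 find_square1_alt
  obtain ⟨hnil, hp⟩ := hpre
  by_cases h01 : (data.getD 0 []).length = 1
  · rw [find_square1, dif_neg hnil, if_pos h01, if_pos h01]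
  · by_cases hz : ∀ row ∈ data, ∀ x ∈ row, ¬x = 0
    · rw [find_square1, dif_neg hnil, if_neg h01, if_pos (anyzero_false data hz)]
      rw [if_neg h01, if_pos (by
        rw [List.all_eq_true]
        intro z hzmem
        obtain ⟨row, hrow, rfl⟩ := List.mem_map.1 hzmem
        rw [zposB_nil row (hz row hrow)]
        rfl)]
    · obtain ⟨hpow, hsq⟩ : data.length.isPowerOfTwo ∧
          ∀ row ∈ data, row.length = data.length := by
        rcases hp with h | h | h
        · exact absurd h h01
        · exact absurd h hz
        · exact h
      have hpow' : data.length = 2 ^ Nat.log2 data.length := by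
        obtain ⟨k, hk⟩ := hpow
        rw [hk, Nat.log2_two_pow]
      have hall : ¬((data.map zposB).all (fun z => z.isEmpty)) = true := by
        push Not at hz
        obtain ⟨row, hrow, x, hx, hx0⟩ := hz
        intro hall
        rw [List.all_eq_true] at hall
        have hemp := hall (zposB row) (List.mem_map_of_mem hrow)
        rw [List.isEmpty_iff] at hemp
        obtain ⟨i, hi, hgx⟩ := List.getElem_of_mem hx
        have : i ∈ zposB row := by
          rw [mem_zposB, List.getElem?_eq_getElem hi, hgx, hx0]
        rw [hemp] at this
        simp at this
      rw [if_neg h01, if_neg hall]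
      have hk := main_lemma data hsq (Nat.log2 data.length) 0 0 (by omega) (by omega)
      rw [← hpow', subG_self data hsq] at hk
      exact hk
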